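-- pv_equiv track=rewrite | github.com/ShaneByrne0963/python-poker | run.py | get_list_as_sentence
-- ===== SOURCE A (Python) =====
-- def get_list_as_sentence(my_list):
--     """
--     Returns a list of elements as a string in a
--     readable sentence, with every element separated
--     by a comma and an "and" for the last one
--     """
--     sentence = ''
--     length = len(my_list)
--     for i in range(length):
--         sentence += my_list[i]
--         if i == length - 2:
--             sentence += ' and '
--         elif i < length - 2:
--             sentence += ', '
--     return sentence
-- ===== SOURCE B (Python) =====
-- def get_list_as_sentence(my_list):
--     """
--     Returns a list of elements as a string in a
--     readable sentence, with every element separated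
--     by a comma and an "and" for the last one
--     """
--     if not my_list:
--         return ''
--     if len(my_list) == 1:
--         return ''.join(my_list)
--     return ', '.join(my_list[:-1]) + ' and ' + my_list[-1]
-- ===== Notes on version B (the rewrite author's own statement) =====
-- stated objective: idiomatic
-- what changed: Replaces the index loop with positional lookahead branches by a slice-and-join: ', '.join over all but the last element plus a separate ' and ' + last element.
import Mathlib
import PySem

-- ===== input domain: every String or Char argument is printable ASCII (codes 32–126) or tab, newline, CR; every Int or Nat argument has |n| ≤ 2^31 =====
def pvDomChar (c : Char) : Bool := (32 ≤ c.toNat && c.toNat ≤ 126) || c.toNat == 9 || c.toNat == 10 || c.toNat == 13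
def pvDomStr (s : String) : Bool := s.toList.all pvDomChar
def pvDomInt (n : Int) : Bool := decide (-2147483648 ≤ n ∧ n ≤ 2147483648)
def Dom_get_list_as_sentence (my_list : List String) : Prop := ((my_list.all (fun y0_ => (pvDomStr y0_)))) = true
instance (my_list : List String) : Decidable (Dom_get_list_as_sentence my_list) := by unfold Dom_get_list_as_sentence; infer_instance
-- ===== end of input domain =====

-- B replaces A's index loop and lookahead branches with ', '.join over all but the
-- last element plus separate handling of the final ' and ' (idiomatic; same cost).

-- ===== PORT A =====
def get_list_as_sentence (my_list : List String) : String :=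
  let length : Int := my_list.length
  (PySem.List.pyRange 0 length 1).foldl
    (fun sentence i =>
      let sentence := sentence ++ PySem.List.pyGetD my_list i ""
      if i == length - 2 then sentence ++ " and "
      else if i < length - 2 then sentence ++ ", "
      else sentence) ""

-- ===== PORT B =====
def get_list_as_sentence_alt (my_list : List String) : String :=
  if my_list = [] then ""
  else if my_list.length = 1 then PySem.Str.join "" my_list
  else PySem.Str.join ", " (PySem.List.slice my_list none (some (-1)))
       ++ " and " ++ PySem.List.pyGetD my_list (-1) ""

-- ===== PRECONDITION & SPEC =====
def Spec_get_list_as_sentence (my_list : List String) (out : String) : Prop := out = get_list_as_sentence_alt my_list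
instance (my_list : List String) (out : String) : Decidable (Spec_get_list_as_sentence my_list out) := by unfold Spec_get_list_as_sentence; infer_instance

-- ===== CLAIM (what is proved, stated in full; the proofs are below) =====
def Claim_equal_get_list_as_sentence : Prop := ∀ (my_list : List String), Dom_get_list_as_sentence my_list → Spec_get_list_as_sentence my_list (get_list_as_sentence my_list)

-- ===== LEMMAS AND PROOFS =====

-- The separator A appends after the element at a position with `k` elements remaining after it.
def pvSep (k : Nat) : String := if k = 1 then " and " else if 2 ≤ k then ", " else ""

-- A's sentence, characterised structurally on the list.
def pvSent : List String → String
  | [] => ""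
  | x :: xs => x ++ pvSep xs.length ++ pvSent xs

lemma pvSep_succ_succ (n : Nat) : pvSep (n + 1 + 1) = ", " := by
  unfold pvSep; rw [if_neg (by omega), if_pos (by omega)]

lemma pvLoop (L : Int) (xs : List String) (s : Int) (acc : String)
    (h : s + xs.length = L) :
    (PySem.List.enumerate xs s).foldl
      (fun sentence p =>
        let sentence := sentence ++ p.2
        if p.1 == L - 2 then sentence ++ " and "
        else if p.1 < L - 2 then sentence ++ ", "
        else sentence) acc = acc ++ pvSent xs := by
  induction xs generalizing s acc with
  | nil => simp [PySem.List.enumerate_nil, pvSent]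
  | cons x xs ih =>
      simp only [List.length_cons] at h
      push_cast at h
      rw [PySem.List.enumerate_cons, List.foldl_cons]
      rw [ih (s + 1) _ (by omega)]
      simp only [pvSent, pvSep]
      by_cases hs : s = L - 2
      · have h1 : xs.length = 1 := by omega
        simp [hs, h1, String.append_assoc]
      · by_cases hlt : s < L - 2
        · have h1 : ¬ xs.length = 1 := by omega
          have h2 : 2 ≤ xs.length := by omega
          simp [hs, hlt, h1, h2, String.append_assoc]
        · have h1 : ¬ xs.length = 1 := by omega
          have h2 : ¬ 2 ≤ xs.length := by omega
          simp [hs, hlt, h1, h2, String.append_assoc]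

lemma pvA_eq_sent (xs : List String) : get_list_as_sentence xs = pvSent xs := by
  have he : PySem.List.enumerate xs 0
      = (PySem.List.pyRange 0 (xs.length : Int) 1).map
          (fun j => (j, PySem.List.pyGetD xs j "")) := by
    simpa using PySem.List.enumerate_eq_map_pyRange (xs := xs) (d := "")
  have h := pvLoop (xs.length : Int) xs 0 "" (by simp)
  rw [he, List.foldl_map] at h
  unfold get_list_as_sentence
  simpa using h

lemma pvSent_two (x y : String) (l : List String) :
    pvSent (x :: y :: l)
      = PySem.Str.join ", " ((x :: y :: l).dropLast)
        ++ " and " ++ (x :: y :: l).getLast (by simp) := by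
  induction l generalizing x y with
  | nil =>
      apply String.toList_inj.mp
      simp [pvSent, pvSep, PySem.Str.join, PySem.Chars.join_singleton]
  | cons z l ih =>
      apply String.toList_inj.mp
      have hy := congrArg String.toList (ih y z)
      simp [pvSent, pvSep_succ_succ, String.append_assoc,
        PySem.Chars.join_cons_cons] at hy ⊢
      simp [hy]

lemma pvSent_eq_alt (xs : List String) : pvSent xs = get_list_as_sentence_alt xs := by
  match xs with
  | [] => simp [pvSent, get_list_as_sentence_alt]
  | [x] => simp [pvSent, pvSep, get_list_as_sentence_alt, PySem.Str.join]
  | x :: y :: l =>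
      rw [pvSent_two]
      unfold get_list_as_sentence_alt
      rw [if_neg (by simp), if_neg (by simp)]
      rw [PySem.List.slice_to_neg_one, PySem.List.pyGetD_neg_one (h := by simp)]

-- ===== VERDICT (by name: the statement is the Claim_ definition above) =====
theorem get_list_as_sentence_spec : Claim_equal_get_list_as_sentence := by
  intro xs _
  unfold Spec_get_list_as_sentence
  rw [pvA_eq_sent, pvSent_eq_alt]
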